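-- pv_equiv track=rewrite | github.com/Midotech31/g-synth-toolkit | G-Synth_6_Streamlit.py | optimal_alignment
-- ===== SOURCE A (Python) =====
-- def is_complement(base1, base2):
--     """Check base complementarity (preserved exactly from original)"""
--     comp = {'A': 'T', 'T': 'A', 'G': 'C', 'C': 'G', 'N': 'N'}
--     return comp.get(base1.upper(), '') == base2.upper()
--
-- def optimal_alignment(forward, reverse_comp, max_shift=None):
--     """Find optimal alignment (preserved exactly from original)"""
--     if max_shift is None:
--         max_shift = len(forward) + len(reverse_comp)
--     else:
--         max_shift = min(max_shift, len(forward) + len(reverse_comp))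
--
--     best = (0, 0)
--
--     for shift in range(-len(reverse_comp)+1, len(forward)):
--         score = 0
--         for i in range(max(0, shift), min(len(forward), shift + len(reverse_comp))):
--             j = i - shift
--             if 0 <= j < len(reverse_comp) and is_complement(forward[i], reverse_comp[j]):
--                 score += 1
--
--         if score > best[1]:
--             best = (shift, score)
--
--     return best
-- ===== SOURCE B (Python) =====
-- def optimal_alignment(forward, reverse_comp, max_shift=None):
--     """Best complementary alignment via a per-shift match counter built from
--     base-position indices (one pass over matching pairs instead of rescanning
--     every shift). max_shift is accepted for interface compatibility; like the
--     original, the result never depends on it."""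
--     comp = {'A': 'T', 'T': 'A', 'G': 'C', 'C': 'G', 'N': 'N'}
--     # positions of each (uppercased) character in reverse_comp
--     pos = {}
--     for j, c in enumerate(reverse_comp):
--         pos.setdefault(c.upper(), []).append(j)
--     # count complementary pairs per shift i - j
--     counts = {}
--     for i, c in enumerate(forward):
--         want = comp.get(c.upper())
--         if want is not None:
--             for j in pos.get(want, []):
--                 counts[i - j] = counts.get(i - j, 0) + 1
--     best = (0, 0)
--     for shift in sorted(counts):
--         if counts[shift] > best[1]:
--             best = (shift, counts[shift])
--     return best
-- ===== Notes on version B (the rewrite author's own statement) =====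
-- stated objective: faster
-- what changed: Instead of rescanning every overlap window for each of the n+m-1 shifts, B indexes reverse_comp positions by base, builds a per-shift counter in one pass over the complementary (i,j) pairs only, and then picks the best shift from the counter's sorted keys.
import Mathlib
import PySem

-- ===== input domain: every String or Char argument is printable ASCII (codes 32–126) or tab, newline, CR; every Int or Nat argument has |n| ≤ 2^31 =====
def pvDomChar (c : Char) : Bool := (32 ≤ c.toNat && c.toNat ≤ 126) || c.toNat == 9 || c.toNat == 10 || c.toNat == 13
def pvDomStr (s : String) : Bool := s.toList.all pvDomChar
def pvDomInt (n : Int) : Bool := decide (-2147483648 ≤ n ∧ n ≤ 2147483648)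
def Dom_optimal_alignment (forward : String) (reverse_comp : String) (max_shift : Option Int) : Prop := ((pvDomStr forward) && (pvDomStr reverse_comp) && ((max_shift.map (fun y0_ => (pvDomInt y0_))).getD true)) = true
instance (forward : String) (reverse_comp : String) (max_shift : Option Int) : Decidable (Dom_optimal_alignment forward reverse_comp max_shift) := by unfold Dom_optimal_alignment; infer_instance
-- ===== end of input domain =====

-- B replaces A's per-shift rescan of the whole overlap window by a per-shift counter
-- built in one pass over the complementary (i, j) position pairs (objective: faster).

-- ===== PORT A =====
-- comp = {'A': 'T', 'T': 'A', 'G': 'C', 'C': 'G', 'N': 'N'} (one-char strings ported as Char; exact on ASCII)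
def pvComp : PySem.Dict Char Char :=
  ((((PySem.Dict.empty.insert 'A' 'T').insert 'T' 'A').insert 'G' 'C').insert 'C' 'G').insert 'N' 'N'

-- comp.get(base1.upper(), '') == base2.upper(): the default '' never equals the
-- one-character string base2.upper(), so the comparison is exactly this Option match.
def is_complement (base1 : Char) (base2 : Char) : Bool :=
  match pvComp.get? (PySem.Chars.upperChar base1) with
  | some c => c == PySem.Chars.upperChar base2
  | none => false

def optimal_alignment (forward : String) (reverse_comp : String) (max_shift : Option Int) : Int × Int :=
  let f := forward.toList
  let r := reverse_comp.toList
  -- max_shift is computed exactly as in the Python, which then never reads it again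
  let _max_shift : Int :=
    match max_shift with
    | none => (f.length : Int) + (r.length : Int)
    | some m => min m ((f.length : Int) + (r.length : Int))
  (PySem.List.pyRange (-(r.length : Int) + 1) (f.length : Int)).foldl
    (fun best shift =>
      let score : Int :=
        (PySem.List.pyRange (max 0 shift) (min (f.length : Int) (shift + (r.length : Int)))).foldl
          (fun score i =>
            let j := i - shift
            -- i is in range(0, len(forward)) here, so forward[i]/reverse_comp[j] never raise;
            -- pyGetD with an arbitrary default is exact
            if decide (0 ≤ j) && decide (j < (r.length : Int)) &&
               is_complement (PySem.List.pyGetD f i ' ') (PySem.List.pyGetD r j ' ')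
            then score + 1 else score) 0
      if score > best.2 then (shift, score) else best)
    (0, 0)

-- ===== PORT B =====
def optimal_alignment_alt (forward : String) (reverse_comp : String) (max_shift : Option Int) : Int × Int :=
  let f := forward.toList
  let r := reverse_comp.toList
  -- pos.setdefault(c.upper(), []).append(j)  ≡  modify with default [] (exact)
  let pos : PySem.Dict Char (List Int) :=
    (PySem.List.enumerate r).foldl
      (fun d jc => d.modify (PySem.Chars.upperChar jc.2) [] (fun l => l ++ [jc.1]))
      PySem.Dict.empty
  -- counts[i-j] = counts.get(i-j, 0) + 1
  let counts : PySem.Dict Int Int :=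
    (PySem.List.enumerate f).foldl
      (fun d ic =>
        match pvComp.get? (PySem.Chars.upperChar ic.2) with
        | none => d
        | some want =>
            (pos.getD want []).foldl
              (fun d j => d.insert (ic.1 - j) (d.getD (ic.1 - j) 0 + 1)) d)
      PySem.Dict.empty
  (PySem.List.sorted counts.keys (fun s => s)).foldl
    (fun best shift =>
      let c := counts.getD shift 0
      if c > best.2 then (shift, c) else best)
    (0, 0)

-- ===== PRECONDITION & SPEC =====
def Spec_optimal_alignment (forward : String) (reverse_comp : String) (max_shift : Option Int) (out : Int × Int) : Prop := out = optimal_alignment_alt forward reverse_comp max_shift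
instance (forward : String) (reverse_comp : String) (max_shift : Option Int) (out : Int × Int) : Decidable (Spec_optimal_alignment forward reverse_comp max_shift out) := by unfold Spec_optimal_alignment; infer_instance

-- ===== CLAIM (what is proved, stated in full; the proofs are below) =====
def Claim_equal_optimal_alignment : Prop := ∀ (forward : String) (reverse_comp : String) (max_shift : Option Int), Dom_optimal_alignment forward reverse_comp max_shift → Spec_optimal_alignment forward reverse_comp max_shift (optimal_alignment forward reverse_comp max_shift)

-- ===== LEMMAS AND PROOFS =====

-- A's inner-loop test at shift s, column i
def pvCond (f r : List Char) (s i : Int) : Bool :=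
  decide (0 ≤ i - s) && decide (i - s < (r.length : Int)) &&
    is_complement (PySem.List.pyGetD f i ' ') (PySem.List.pyGetD r (i - s) ' ')

-- positions j of reverse_comp whose uppercased character is w (what B's pos dict stores)
def pvPos (r : List Char) (w : Char) : List Int :=
  ((PySem.List.enumerate r).filter (fun jc => PySem.Chars.upperChar jc.2 == w)).map (fun jc => jc.1)

-- the multiset of shifts i - j over all complementary pairs (what B counts)
def pvPairs (f r : List Char) : List Int :=
  (PySem.List.enumerate f).flatMap (fun ic =>
    match pvComp.get? (PySem.Chars.upperChar ic.2) with
    | none => []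
    | some w => (pvPos r w).map (fun j => ic.1 - j))

lemma pvPos_spec (r : List Char) (w : Char) (j : Int) :
    j ∈ pvPos r w ↔ 0 ≤ j ∧ j < (r.length : Int) ∧ PySem.Chars.upperChar (PySem.List.pyGetD r j ' ') = w := by
  unfold pvPos
  simp only [List.mem_map, List.mem_filter, PySem.List.mem_enumerate_iff]
  constructor
  · rintro ⟨⟨i, c⟩, ⟨⟨k, hk, heq⟩, hup⟩, rfl⟩
    simp only [Prod.mk.injEq] at heq
    obtain ⟨h1, h2⟩ := heq
    subst h1 h2
    refine ⟨by omega, by omega, ?_⟩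
    rw [PySem.List.pyGetD_eq_getElem r ' ' (by omega) (by push_cast; omega)]
    simp only [beq_iff_eq] at hup
    simpa using hup
  · rintro ⟨h0, hlt, hup⟩
    refine ⟨(j, r[j.toNat]'(by omega)), ⟨⟨j.toNat, by omega, by simp; omega⟩, ?_⟩, rfl⟩
    rw [PySem.List.pyGetD_eq_getElem r ' ' h0 hlt] at hup
    simp [hup]

lemma pvPos_nodup (r : List Char) (w : Char) : (pvPos r w).Nodup := by
  unfold pvPos
  have h := (PySem.List.pairwise_lt_enumerate r 0).filter (fun jc => PySem.Chars.upperChar jc.2 == w)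
  have hp : List.Pairwise (fun (a b : Int) => a < b)
      ((((PySem.List.enumerate r).filter (fun jc => PySem.Chars.upperChar jc.2 == w)).map (fun jc => jc.1))) := by
    rw [List.pairwise_map]; exact h
  exact hp.imp (fun hlt => ne_of_lt hlt)

-- B's pos dict holds exactly pvPos
lemma pvPosDict_getD (r : List Char) (w : Char) :
    ((PySem.List.enumerate r).foldl
      (fun d jc => d.modify (PySem.Chars.upperChar jc.2) [] (fun l => l ++ [jc.1]))
      PySem.Dict.empty).getD w [] = pvPos r w := by
  have h : (PySem.List.enumerate r).foldl
      (fun d jc => d.modify (PySem.Chars.upperChar jc.2) [] (fun l => l ++ [jc.1]))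
      PySem.Dict.empty
      = ((PySem.List.enumerate r).map (fun jc => (PySem.Chars.upperChar jc.2, jc.1))).foldl
        (fun d p => d.modify p.1 [] (fun l => l ++ [p.2])) PySem.Dict.empty := by
    rw [List.foldl_map]
  rw [h, PySem.Dict.getD_foldl_modify_append, PySem.Dict.getD_empty]
  unfold pvPos
  simp [List.filter_map, List.map_map, Function.comp_def]

-- B's counts dict is the counter of pvPairs
lemma pvCounts_eq_counter (f r : List Char) :
    ((PySem.List.enumerate f).foldl
      (fun d ic =>
        match pvComp.get? (PySem.Chars.upperChar ic.2) with
        | none => d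
        | some want =>
            (((PySem.List.enumerate r).foldl
              (fun d jc => d.modify (PySem.Chars.upperChar jc.2) [] (fun l => l ++ [jc.1]))
              PySem.Dict.empty).getD want []).foldl
              (fun d j => d.insert (ic.1 - j) (d.getD (ic.1 - j) 0 + 1)) d)
      (PySem.Dict.empty : PySem.Dict Int Int)) = PySem.Dict.counter (pvPairs f r) := by
  rw [← PySem.Dict.foldl_insert_getD_add_one_eq_counter]
  unfold pvPairs
  rw [List.foldl_flatMap]
  apply PySem.List.foldl_congr_mem
  intro acc ic _
  cases hc : pvComp.get? (PySem.Chars.upperChar ic.2) with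
  | none => simp
  | some w =>
    simp only [pvPosDict_getD, List.foldl_map]

-- the window [max 0 s, min n (s+m)) can be widened to [0, n) for a test implying s ≤ i < s + m
lemma pvWindow (s n m : Int) (p : Int → Bool) (hn : 0 ≤ n)
    (hp : ∀ i, p i = true → s ≤ i ∧ i < s + m) :
    List.countP p (PySem.List.pyRange (max 0 s) (min n (s + m))) =
      List.countP p (PySem.List.pyRange 0 n) := by
  rcases le_or_gt (max 0 s) (min n (s + m)) with hle | hlt
  · have h1 : (0:Int) ≤ max 0 s := le_max_left 0 s
    have h2 : min n (s + m) ≤ n := min_le_left _ _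
    rw [PySem.List.pyRange_one_append 0 (max 0 s) n h1 (le_trans hle h2),
        PySem.List.pyRange_one_append (max 0 s) (min n (s + m)) n hle h2,
        List.countP_append, List.countP_append]
    have hz1 : List.countP p (PySem.List.pyRange 0 (max 0 s)) = 0 := by
      rw [List.countP_eq_zero]
      intro i hi
      rw [PySem.List.mem_pyRange_one] at hi
      intro hpi
      have := hp i hpi
      rcases max_cases 0 s with ⟨he, _⟩ | ⟨he, _⟩ <;> omega
    have hz2 : List.countP p (PySem.List.pyRange (min n (s + m)) n) = 0 := by
      rw [List.countP_eq_zero]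
      intro i hi
      rw [PySem.List.mem_pyRange_one] at hi
      intro hpi
      have := hp i hpi
      rcases min_cases n (s + m) with ⟨he, _⟩ | ⟨he, _⟩ <;> omega
    omega
  · have h1 : PySem.List.pyRange (max 0 s) (min n (s + m)) = [] :=
      PySem.List.pyRange_one_eq_nil (le_of_lt hlt)
    rw [h1]
    have h2 : List.countP p (PySem.List.pyRange 0 n) = 0 := by
      rw [List.countP_eq_zero]
      intro i hi
      rw [PySem.List.mem_pyRange_one] at hi
      intro hpi
      have := hp i hpi
      rcases max_cases 0 s with ⟨he1, _⟩ | ⟨he1, _⟩ <;>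
        rcases min_cases n (s + m) with ⟨he2, _⟩ | ⟨he2, _⟩ <;> omega
    simp [h2]

-- a sum of 0/1 Nat indicators is a countP (Nat-valued twin of the Int-valued library fact)
lemma pvSumIndicator {α : Type} (l : List α) (g : α → Nat) (p : α → Bool)
    (h : ∀ x ∈ l, g x = if p x then 1 else 0) :
    (l.map g).sum = l.countP p := by
  induction l with
  | nil => simp
  | cons x xs ih =>
    simp only [List.map_cons, List.sum_cons, List.countP_cons]
    rw [h x (by simp), ih (fun y hy => h y (by simp [hy]))]
    by_cases hx : p x = true <;> simp [hx] <;> omega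

-- per column i: B's pair contribution at shift s is A's inner-loop indicator
lemma pvPoint (f r : List Char) (s i : Int) :
    (List.count s (match pvComp.get? (PySem.Chars.upperChar (PySem.List.pyGetD f i ' ')) with
      | none => ([] : List Int)
      | some w => (pvPos r w).map (fun j => i - j))) = if pvCond f r s i then 1 else 0 := by
  cases hc : pvComp.get? (PySem.Chars.upperChar (PySem.List.pyGetD f i ' ')) with
  | none =>
    simp only [pvCond, is_complement, hc, List.count_nil, Bool.and_false]
    simp
  | some w =>
    have hinj : Function.Injective (fun j : Int => i - j) := by
      intro a b hab; simp at hab; omega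
    have key : List.count s ((pvPos r w).map (fun j => i - j)) = List.count (i - s) (pvPos r w) := by
      have h := List.count_map_of_injective (pvPos r w) (fun j : Int => i - j) hinj (i - s)
      simpa [show i - (i - s) = s by omega] using h
    rw [key]
    by_cases hm : (i - s) ∈ pvPos r w
    · rw [List.count_eq_one_of_mem (pvPos_nodup r w) hm]
      rw [pvPos_spec] at hm
      obtain ⟨h0, h1, h2⟩ := hm
      rw [if_pos]
      simp only [pvCond, is_complement, hc]
      simp only [Bool.and_eq_true, decide_eq_true_eq, beq_iff_eq]
      exact ⟨⟨h0, h1⟩, h2.symm⟩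
    · rw [List.count_eq_zero_of_not_mem hm]
      rw [pvPos_spec] at hm
      push_neg at hm
      rw [if_neg]
      simp only [pvCond, is_complement, hc]
      intro hcontra
      simp only [Bool.and_eq_true, decide_eq_true_eq, beq_iff_eq] at hcontra
      obtain ⟨⟨h0, h1⟩, h2⟩ := hcontra
      exact (hm h0 h1) h2.symm

-- pair count at shift s = A's window score at shift s
lemma pvCount_eq_score (f r : List Char) (s : Int) :
    (((pvPairs f r).count s : Int)) =
      (PySem.List.pyRange (max 0 s) (min (f.length : Int) (s + (r.length : Int)))).foldl
        (fun score i =>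
          if decide (0 ≤ i - s) && decide (i - s < (r.length : Int)) &&
             is_complement (PySem.List.pyGetD f i ' ') (PySem.List.pyGetD r (i - s) ' ')
          then score + 1 else score) 0 := by
  rw [PySem.List.foldl_count_if
      (fun i => decide (0 ≤ i - s) && decide (i - s < (r.length : Int)) &&
        is_complement (PySem.List.pyGetD f i ' ') (PySem.List.pyGetD r (i - s) ' ')), zero_add]
  have hcond : (fun i => decide (0 ≤ i - s) && decide (i - s < (r.length : Int)) &&
        is_complement (PySem.List.pyGetD f i ' ') (PySem.List.pyGetD r (i - s) ' ')) = pvCond f r s := by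
    funext i; rfl
  rw [hcond]
  congr 1
  rw [pvWindow s (f.length : Int) (r.length : Int) (pvCond f r s) (by positivity)
      (by intro i hi
          simp only [pvCond, Bool.and_eq_true, decide_eq_true_eq] at hi
          omega)]
  unfold pvPairs
  rw [PySem.List.enumerate_eq_map_pyRange f ' ']
  rw [List.count_flatMap, List.map_map]
  apply pvSumIndicator
  intro i _
  simpa using pvPoint f r s i

-- any counted shift lies in A's shift range
lemma pvPairs_mem_range (f r : List Char) (s : Int) (h : s ∈ pvPairs f r) :
    -(r.length : Int) + 1 ≤ s ∧ s < (f.length : Int) := by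
  unfold pvPairs at h
  rw [List.mem_flatMap] at h
  obtain ⟨ic, hic, hs⟩ := h
  rw [PySem.List.mem_enumerate_iff] at hic
  obtain ⟨k, hk, rfl⟩ := hic
  simp only at hs
  cases hc : pvComp.get? (PySem.Chars.upperChar (f[k])) with
  | none => rw [hc] at hs; simp at hs
  | some w =>
    rw [hc] at hs
    rw [List.mem_map] at hs
    obtain ⟨j, hj, rfl⟩ := hs
    rw [pvPos_spec] at hj
    omega

-- sorted(counts) = the positively-scoring shifts of A's range, in A's order
lemma pvSorted_keys (f r : List Char) :
    PySem.List.sorted (PySem.Set.ofList (pvPairs f r)) (fun s => s) =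
      (PySem.List.pyRange (-(r.length : Int) + 1) (f.length : Int)).filter
        (fun s => decide ((0 : Int) < ((pvPairs f r).count s : Int))) := by
  apply PySem.List.sorted_eq_of_perm_of_pairwise_lt
  · rw [List.perm_ext_iff_of_nodup
      ((PySem.List.nodup_pyRange_one _ _).filter _) (PySem.Set.nodup_ofList _)]
    intro a
    rw [List.mem_filter, PySem.Set.mem_ofList, PySem.List.mem_pyRange_one]
    constructor
    · rintro ⟨-, hpos⟩
      simp only [decide_eq_true_eq] at hpos
      have h : 0 < (pvPairs f r).count a := by exact_mod_cast hpos
      exact List.count_pos_iff.mp h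
    · intro hmem
      have hb := pvPairs_mem_range f r a hmem
      have h : 0 < (pvPairs f r).count a := List.count_pos_iff.mpr hmem
      refine ⟨⟨hb.1, hb.2⟩, by simpa using h⟩
  · exact (PySem.List.pairwise_lt_pyRange_one _ _).filter _

-- skipping zero-score shifts never changes the best (best.2 stays ≥ 0)
lemma pvFoldl_filter_pos (sc : Int → Int) (l : List Int) (best : Int × Int) (hb : 0 ≤ best.2) :
    l.foldl (fun b s => if sc s > b.2 then (s, sc s) else b) best =
      (l.filter (fun s => decide (0 < sc s))).foldl
        (fun b s => if sc s > b.2 then (s, sc s) else b) best := by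
  induction l generalizing best with
  | nil => simp
  | cons x xs ih =>
    by_cases hx : 0 < sc x
    · rw [List.filter_cons_of_pos (by simpa using hx)]
      simp only [List.foldl_cons]
      apply ih
      split_ifs with h
      · exact le_of_lt (lt_of_le_of_lt hb h)
      · exact hb
    · rw [List.filter_cons_of_neg (by simpa using hx)]
      simp only [List.foldl_cons]
      rw [if_neg (by omega)]
      exact ih best hb

-- ===== VERDICT (by name: the statement is the Claim_ definition above) =====
theorem optimal_alignment_spec : Claim_equal_optimal_alignment := by
  intro forward reverse_comp max_shift _
  unfold Spec_optimal_alignment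
  unfold optimal_alignment optimal_alignment_alt
  set f := forward.toList with hf
  set r := reverse_comp.toList with hr
  simp only []
  rw [pvCounts_eq_counter f r, PySem.Dict.keys_counter, pvSorted_keys f r]
  have hstep :
      (fun (best : Int × Int) (shift : Int) =>
        if (PySem.Dict.counter (pvPairs f r)).getD shift 0 > best.2
        then (shift, (PySem.Dict.counter (pvPairs f r)).getD shift 0) else best) =
      (fun (b : Int × Int) (s : Int) =>
        if ((pvPairs f r).count s : Int) > b.2 then (s, ((pvPairs f r).count s : Int)) else b) := by
    funext b s
    rw [PySem.Dict.getD_counter]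
  have hstepA :
      (fun (best : Int × Int) (shift : Int) =>
        if (PySem.List.pyRange (max 0 shift) (min (f.length : Int) (shift + (r.length : Int)))).foldl
            (fun score i =>
              if decide (0 ≤ i - shift) && decide (i - shift < (r.length : Int)) &&
                 is_complement (PySem.List.pyGetD f i ' ') (PySem.List.pyGetD r (i - shift) ' ')
              then score + 1 else score) 0 > best.2
        then (shift,
          (PySem.List.pyRange (max 0 shift) (min (f.length : Int) (shift + (r.length : Int)))).foldl
            (fun score i =>
              if decide (0 ≤ i - shift) && decide (i - shift < (r.length : Int)) &&
                 is_complement (PySem.List.pyGetD f i ' ') (PySem.List.pyGetD r (i - shift) ' ')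
              then score + 1 else score) 0) else best) =
      (fun (b : Int × Int) (s : Int) =>
        if ((pvPairs f r).count s : Int) > b.2 then (s, ((pvPairs f r).count s : Int)) else b) := by
    funext b s
    rw [← pvCount_eq_score f r s]
  rw [hstep, hstepA]
  rw [pvFoldl_filter_pos (fun s => ((pvPairs f r).count s : Int)) _ (0, 0) (by norm_num)]
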